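-- pv_equiv track=rewrite | github.com/ZckFreedom/Mathworks | db_sqence/dB_for_powers.py | get_representlist
-- ===== SOURCE A (Python) =====
-- def get_representlist(cycle_list):
-- 	size = len(cycle_list[0][0])
-- 	necklace_list = []
-- 	lexi_list = []
-- 	for local in range(0, len(cycle_list)):
-- 		if cycle_list[local][0][0] == cycle_list[local][0][-1]:
-- 			necklace_list.append(cycle_list[local][0][:size - 1])
-- 		else:
-- 			cycle_length = len(cycle_list[local])
-- 			reval = [x[-1] for x in cycle_list[local]]
-- 			reval += reval
-- 			for i in range(0, cycle_length):
-- 				lexi_list.append(reval[i: i + cycle_length])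
-- 			lexi_list.sort(reverse=True)
-- 			necklace_list.append(lexi_list[0][: size - 1])
-- 			lexi_list.clear()
-- 	return necklace_list
-- ===== SOURCE B (Python) =====
-- def get_representlist(cycle_list):
--     size = len(cycle_list[0][0])
--     out = []
--     for cycle in cycle_list:
--         first = cycle[0]
--         if first[0] == first[-1]:
--             out.append(first[:size - 1])
--         else:
--             vals = [x[-1] for x in cycle]
--             n = len(vals)
--             best = 0
--             for i in range(1, n):
--                 # compare rotation starting at i with rotation starting at best,
--                 # element by element, without materialising either rotation
--                 for k in range(n):
--                     a = vals[(i + k) % n]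
--                     b = vals[(best + k) % n]
--                     if a != b:
--                         if a > b:
--                             best = i
--                         break
--             rot = vals[best:] + vals[:best]
--             out.append(rot[:size - 1])
--     return out
-- ===== Notes on version B (the rewrite author's own statement) =====
-- stated objective: alternative
-- what changed: Instead of materialising all n rotations of each cycle (via a doubled list) and reverse-sorting them to take the first, B keeps only the best rotation start index, comparing each candidate rotation to the current best element-by-element in place with an early exit at the first differing position, and builds the single winning rotation at the end.
import Mathlib
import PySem

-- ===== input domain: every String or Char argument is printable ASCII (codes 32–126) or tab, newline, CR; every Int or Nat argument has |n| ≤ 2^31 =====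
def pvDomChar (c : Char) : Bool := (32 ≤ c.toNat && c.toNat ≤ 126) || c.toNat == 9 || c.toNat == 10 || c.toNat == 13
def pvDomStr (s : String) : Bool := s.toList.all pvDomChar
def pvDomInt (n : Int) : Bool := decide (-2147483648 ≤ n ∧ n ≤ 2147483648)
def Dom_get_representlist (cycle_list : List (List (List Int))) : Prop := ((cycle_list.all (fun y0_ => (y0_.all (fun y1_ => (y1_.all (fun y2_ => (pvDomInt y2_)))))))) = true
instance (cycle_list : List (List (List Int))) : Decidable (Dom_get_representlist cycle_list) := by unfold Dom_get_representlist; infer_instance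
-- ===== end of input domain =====

-- B replaces A's build-all-rotations-then-reverse-sort by an argmax scan over rotation start
-- indices with in-place, early-exit comparisons; equality of the returned value is proved on Pre_.

-- ===== PORT A =====
def get_representlist (cycle_list : List (List (List Int))) : List (List Int) :=
  let size : Int := PySem.List.len (PySem.List.pyGetD (PySem.List.pyGetD cycle_list 0 []) 0 [])
  (List.foldl
    (fun (st : List (List Int) × List (List Int)) local_ =>
      let cyc := PySem.List.pyGetD cycle_list local_ []
      let f := PySem.List.pyGetD cyc 0 []
      if PySem.List.pyGetD f 0 0 = PySem.List.pyGetD f (-1) 0 then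
        (st.1 ++ [PySem.List.slice f none (some (size - 1))], st.2)
      else
        let cycle_length : Int := PySem.List.len cyc
        let reval := cyc.map (fun x => PySem.List.pyGetD x (-1) 0)
        let reval2 := reval ++ reval
        let lexi := List.foldl
          (fun acc i => acc ++ [PySem.List.slice reval2 (some i) (some (i + cycle_length))])
          st.2 (PySem.List.pyRange 0 cycle_length 1)
        let sortedl := PySem.List.sorted lexi (fun x => x) true
        (st.1 ++ [PySem.List.slice (PySem.List.pyGetD sortedl 0 []) none (some (size - 1))], []))
    ([], []) (PySem.List.pyRange 0 (PySem.List.len cycle_list) 1)).1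

-- ===== PORT B =====
-- the inner 'for k in range(n): … break' loop of Source B, as recursion over the remaining k's
def pyCmpLoop (vals : List Int) (n i best : Int) : List Int → Int
  | [] => best
  | k :: rest =>
      let a := PySem.List.pyGetD vals (PySem.Int.mod (i + k) n) 0
      let b := PySem.List.pyGetD vals (PySem.Int.mod (best + k) n) 0
      if a ≠ b then (if b < a then i else best) else pyCmpLoop vals n i best rest

def get_representlist_alt (cycle_list : List (List (List Int))) : List (List Int) :=
  let size : Int := PySem.List.len (PySem.List.pyGetD (PySem.List.pyGetD cycle_list 0 []) 0 [])
  List.foldl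
    (fun out cyc =>
      let f := PySem.List.pyGetD cyc 0 []
      if PySem.List.pyGetD f 0 0 = PySem.List.pyGetD f (-1) 0 then
        out ++ [PySem.List.slice f none (some (size - 1))]
      else
        let vals := cyc.map (fun x => PySem.List.pyGetD x (-1) 0)
        let n : Int := PySem.List.len vals
        let best := List.foldl
          (fun best i => pyCmpLoop vals n i best (PySem.List.pyRange 0 n 1))
          0 (PySem.List.pyRange 1 n 1)
        let rot := PySem.List.slice vals (some best) none ++ PySem.List.slice vals none (some best)
        out ++ [PySem.List.slice rot none (some (size - 1))])
    [] cycle_list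

-- ===== PRECONDITION & SPEC =====
-- Pre_ is exactly where the Python A returns: nonempty outer list, every cycle nonempty with a
-- nonempty first member, and — whenever the rotation branch runs, i.e. the first member's first
-- and last entries differ — no empty member anywhere in the cycle (x[-1] would raise IndexError).
def Pre_get_representlist (cycle_list : List (List (List Int))) : Prop :=
  cycle_list ≠ [] ∧ ∀ cyc ∈ cycle_list, cyc ≠ [] ∧ cyc.headI ≠ [] ∧
    (cyc.headI.head? = cyc.headI.getLast? ∨ ∀ x ∈ cyc, x ≠ [])
instance (cycle_list : List (List (List Int))) : Decidable (Pre_get_representlist cycle_list) := by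
  unfold Pre_get_representlist; infer_instance

def pvWitness_get_representlist : List (List (List Int)) := [[[1, 2], [2, 3]], [[3, 3], []]]

def Spec_get_representlist (cycle_list : List (List (List Int))) (out : List (List Int)) : Prop := out = get_representlist_alt cycle_list
instance (cycle_list : List (List (List Int))) (out : List (List Int)) : Decidable (Spec_get_representlist cycle_list out) := by unfold Spec_get_representlist; infer_instance

-- ===== CLAIM (what is proved, stated in full; the proofs are below) =====
def Claim_equal_get_representlist : Prop := ∀ (cycle_list : List (List (List Int))), Dom_get_representlist cycle_list → Pre_get_representlist cycle_list → Spec_get_representlist cycle_list (get_representlist cycle_list)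

-- ===== LEMMAS AND PROOFS =====

-- the rotation of vals starting at position j
def rotAt (vals : List Int) (j : Nat) : List Int := vals.drop j ++ vals.take j

lemma length_rotAt (vals : List Int) (j : Nat) (h : j ≤ vals.length) :
    (rotAt vals j).length = vals.length := by
  simp [rotAt]; omega

-- 'first differing position' comparison: the boolean Source B's inner loop decides
def lexPick : List Int → List Int → Bool
  | _, [] => false
  | [], _ :: _ => false
  | x :: xs, y :: ys => if x ≠ y then decide (x < y) else lexPick xs ys

lemma lexPick_eq_decide_lt : ∀ xs ys : List Int, xs.length = ys.length →
    lexPick xs ys = decide (xs < ys)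
  | [], [], _ => by simp [lexPick]
  | [], _ :: _, h => by simp at h
  | _ :: _, [], h => by simp at h
  | x :: xs, y :: ys, h => by
      by_cases hxy : x = y
      · subst hxy
        rw [show lexPick (x :: xs) (x :: ys) = lexPick xs ys by simp [lexPick],
          lexPick_eq_decide_lt xs ys (by simpa using h)]
        exact decide_eq_decide.mpr (by simp)
      · rw [show lexPick (x :: xs) (y :: ys) = decide (x < y) by simp [lexPick, hxy]]
        exact decide_eq_decide.mpr (by simp [List.cons_lt_cons_iff, hxy])

lemma pyGetD_mod_rot (vals : List Int) (i k : Nat) (hi : i < vals.length) (hk : k < vals.length) :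
    PySem.List.pyGetD vals (PySem.Int.mod ((i : Int) + (k : Int)) (vals.length : Int)) 0
      = (rotAt vals i).getD k 0 := by
  have h1 : ((i : Int) + (k : Int)) = ((i + k : Nat) : Int) := by push_cast; ring
  rw [h1, PySem.Int.mod_natCast, PySem.List.pyGetD_natCast]
  rw [rotAt, List.getD_eq_getElem?_getD, List.getD_eq_getElem?_getD]
  by_cases hc : k < vals.length - i
  · have hmod : (i + k) % vals.length = i + k := Nat.mod_eq_of_lt (by omega)
    rw [hmod, List.getElem?_append_left (by simp; omega), List.getElem?_drop]
  · have hmod : (i + k) % vals.length = i + k - vals.length := by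
      have h2 : (i + k) % vals.length = (i + k - vals.length) % vals.length := by
        rw [Nat.mod_eq_sub_mod (by omega)]
      rw [h2, Nat.mod_eq_of_lt (by omega)]
    rw [hmod, List.getElem?_append_right (by simp; omega), List.getElem?_take_of_lt (by simp; omega)]
    congr 2
    simp
    omega

lemma cmpLoop_spec (vals : List Int) (ii bb : Nat) (hii : ii < vals.length) (hbb : bb < vals.length) :
    ∀ m k : Nat, k + m = vals.length →
      pyCmpLoop vals (vals.length : Int) (ii : Int) (bb : Int) (PySem.List.pyRange (k : Int) (vals.length : Int) 1)
        = cond (lexPick ((rotAt vals bb).drop k) ((rotAt vals ii).drop k)) (ii : Int) (bb : Int)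
  | 0, k, hk => by
      have h1 : PySem.List.pyRange (k : Int) (vals.length : Int) 1 = [] :=
        PySem.List.pyRange_one_eq_nil (by omega)
      have h2 : (rotAt vals bb).drop k = [] :=
        List.drop_eq_nil_iff.mpr (by rw [length_rotAt _ _ (le_of_lt hbb)]; omega)
      have h3 : (rotAt vals ii).drop k = [] :=
        List.drop_eq_nil_iff.mpr (by rw [length_rotAt _ _ (le_of_lt hii)]; omega)
      rw [h1, h2, h3]
      simp [pyCmpLoop, lexPick]
  | m + 1, k, hk => by
      have hklt : k < vals.length := by omega
      have h1 : PySem.List.pyRange (k : Int) (vals.length : Int) 1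
          = (k : Int) :: PySem.List.pyRange ((k : Int) + 1) (vals.length : Int) 1 :=
        PySem.List.pyRange_one_cons (by exact_mod_cast hklt)
      have h2 : ((k : Int) + 1) = ((k + 1 : Nat) : Int) := by push_cast; ring
      have hlb : (rotAt vals bb).length = vals.length := length_rotAt _ _ (le_of_lt hbb)
      have hli : (rotAt vals ii).length = vals.length := length_rotAt _ _ (le_of_lt hii)
      have hdb : (rotAt vals bb).drop k = (rotAt vals bb)[k]'(by omega) :: (rotAt vals bb).drop (k + 1) :=
        List.drop_eq_getElem_cons (by omega)
      have hdi : (rotAt vals ii).drop k = (rotAt vals ii)[k]'(by omega) :: (rotAt vals ii).drop (k + 1) :=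
        List.drop_eq_getElem_cons (by omega)
      have ha : PySem.List.pyGetD vals (PySem.Int.mod ((ii : Int) + (k : Int)) (vals.length : Int)) 0
          = (rotAt vals ii)[k]'(by omega) := by
        rw [pyGetD_mod_rot vals ii k hii hklt, List.getD_eq_getElem?_getD,
          List.getElem?_eq_getElem (by omega)]
        rfl
      have hb : PySem.List.pyGetD vals (PySem.Int.mod ((bb : Int) + (k : Int)) (vals.length : Int)) 0
          = (rotAt vals bb)[k]'(by omega) := by
        rw [pyGetD_mod_rot vals bb k hbb hklt, List.getD_eq_getElem?_getD,
          List.getElem?_eq_getElem (by omega)]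
        rfl
      rw [h1]
      simp only [pyCmpLoop]
      rw [ha, hb, hdb, hdi]
      by_cases hab : (rotAt vals ii)[k]'(by omega) = (rotAt vals bb)[k]'(by omega)
      · rw [if_neg (by simpa using hab), h2,
          cmpLoop_spec vals ii bb hii hbb m (k + 1) (by omega)]
        simp [lexPick, hab]
      · have hab' : ¬ (rotAt vals bb)[k]'(by omega) = (rotAt vals ii)[k]'(by omega) :=
          fun h => hab h.symm
        rw [if_pos (by simpa using hab)]
        by_cases hlt : (rotAt vals bb)[k]'(by omega) < (rotAt vals ii)[k]'(by omega)
        · simp [lexPick, hab', hlt]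
        · simp [lexPick, hab', hlt]

lemma cmpLoop_max (vals : List Int) (ii bb : Nat) (hii : ii < vals.length) (hbb : bb < vals.length) :
    pyCmpLoop vals (vals.length : Int) (ii : Int) (bb : Int) (PySem.List.pyRange 0 (vals.length : Int) 1)
      = (if rotAt vals bb < rotAt vals ii then (ii : Int) else (bb : Int)) := by
  have h := cmpLoop_spec vals ii bb hii hbb vals.length 0 (by omega)
  rw [show ((0 : Nat) : Int) = 0 from rfl] at h
  simp only [List.drop_zero] at h
  rw [h, lexPick_eq_decide_lt _ _
    (by rw [length_rotAt _ _ (le_of_lt hbb), length_rotAt _ _ (le_of_lt hii)])]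
  by_cases hc : rotAt vals bb < rotAt vals ii
  · simp [hc]
  · simp [hc]

lemma fold_best_aux (vals : List Int) :
    ∀ j : Nat, 1 ≤ j → j ≤ vals.length →
      ∃ b : Nat, b < j ∧
        List.foldl (fun best i => pyCmpLoop vals (vals.length : Int) i best (PySem.List.pyRange 0 (vals.length : Int) 1))
          0 (PySem.List.pyRange 1 (j : Int) 1) = (b : Int) ∧
        ∀ t : Nat, t < j → rotAt vals t ≤ rotAt vals b := by
  intro j
  induction j with
  | zero => intro h; omega
  | succ j ih =>
    intro _ hj1
    by_cases hj : j = 0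
    · subst hj
      refine ⟨0, by omega, ?_, ?_⟩
      · have h0 : ((0 + 1 : Nat) : Int) = 1 := by norm_num
        have h1 : PySem.List.pyRange 1 1 1 = [] := PySem.List.pyRange_one_eq_nil (by norm_num)
        rw [h0, h1]
        rfl
      · intro t ht
        have : t = 0 := by omega
        subst this
        exact le_refl _
    · obtain ⟨b, hb, hfold, hmax⟩ := ih (by omega) (by omega)
      have hsplit : PySem.List.pyRange 1 ((j + 1 : Nat) : Int) 1
          = PySem.List.pyRange 1 (j : Int) 1 ++ [(j : Int)] := by
        rw [show ((j + 1 : Nat) : Int) = (j : Int) + 1 by push_cast; ring]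
        exact PySem.List.pyRange_one_succ_right (by exact_mod_cast Nat.one_le_iff_ne_zero.mpr hj)
      have hstep : List.foldl (fun best i => pyCmpLoop vals (vals.length : Int) i best (PySem.List.pyRange 0 (vals.length : Int) 1))
            0 (PySem.List.pyRange 1 ((j + 1 : Nat) : Int) 1)
          = pyCmpLoop vals (vals.length : Int) (j : Int) (b : Int) (PySem.List.pyRange 0 (vals.length : Int) 1) := by
        rw [hsplit, List.foldl_append, hfold]
        rfl
      rw [hstep, cmpLoop_max vals j b (by omega) (by omega)]
      by_cases hc : rotAt vals b < rotAt vals j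
      · refine ⟨j, by omega, by simp [hc], ?_⟩
        intro t ht
        by_cases htj : t = j
        · subst htj; exact le_refl _
        · exact le_trans (hmax t (by omega)) (le_of_lt hc)
      · refine ⟨b, by omega, by simp [hc], ?_⟩
        intro t ht
        by_cases htj : t = j
        · subst htj; exact le_of_not_gt hc
        · exact hmax t (by omega)

lemma slice_rot (vals : List Int) (k : Nat) (hk : k ≤ vals.length) :
    PySem.List.slice (vals ++ vals) (some (k : Int)) (some ((k : Int) + (vals.length : Int)))
      = rotAt vals k := by
  rw [show ((k : Int) + (vals.length : Int)) = ((k + vals.length : Nat) : Int) by push_cast; ring,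
    PySem.List.slice_natCast, List.drop_append_of_le_length hk, rotAt]
  rw [show k + vals.length - k = vals.length by omega]
  rw [List.take_append, List.take_of_length_le (by simp)]
  congr 2
  simp
  omega

lemma rotB_slices (vals : List Int) (b : Nat) :
    PySem.List.slice vals (some (b : Int)) none ++ PySem.List.slice vals none (some (b : Int))
      = rotAt vals b := by
  rw [PySem.List.slice_from_natCast, PySem.List.slice_to_natCast, rotAt]

-- the LinearOrder-instance view of the reverse sort, with instance-consistent adapters to the
-- PySem order lemmas (the port's call elaborated with other, propositionally equal instances)
def sortedLO {kappa : Type} [LinearOrder kappa] (L : List kappa) : List kappa :=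
  PySem.List.sorted L (fun x => x) true

lemma sortedLO_ne_nil {kappa : Type} [LinearOrder kappa] (L : List kappa) (h : L ≠ []) :
    sortedLO L ≠ [] := by
  rw [sortedLO, Ne, PySem.List.sorted_eq_nil_iff]
  exact h

lemma sortedLO_perm {kappa : Type} [LinearOrder kappa] (L : List kappa) : (sortedLO L).Perm L :=
  PySem.List.sorted_perm L (fun x => x) true

lemma sortedLO_head_ge {kappa : Type} [LinearOrder kappa] (L : List kappa) (m : kappa)
    (t : List kappa) (hmt : sortedLO L = m :: t) : ∀ y ∈ L, y ≤ m :=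
  PySem.List.key_head_sorted_rev_ge L (fun x => x) hmt

lemma sortedLO_foldl {kappa : Type} [LinearOrder kappa] (L : List kappa) :
    sortedLO L = List.foldl (fun acc x => PySem.List.insertBy (fun a b => decide (b < a)) x acc) [] L :=
  PySem.List.sorted_rev_eq_foldl_insertBy L (fun x => x)

-- the port's sorted call computes sortedLO (the two decide's agree pointwise)
lemma sorted_rev_bridge (L : List (List Int)) :
    PySem.List.sorted L (fun x : List Int => x) true = sortedLO L := by
  rw [PySem.List.sorted_rev_eq_foldl_insertBy, sortedLO_foldl]
  congr 1
  funext acc x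
  congr 1
  funext a b
  exact decide_eq_decide.mpr Iff.rfl

lemma sorted_head_eq (vals : List Int) (hne : vals ≠ []) (b : Nat) (hb : b < vals.length)
    (hmax : ∀ t : Nat, t < vals.length → rotAt vals t ≤ rotAt vals b) :
    PySem.List.pyGetD
      (PySem.List.sorted ((List.range vals.length).map (fun j => rotAt vals j)) (fun x => x) true) 0 []
      = rotAt vals b := by
  set L := (List.range vals.length).map (fun j => rotAt vals j) with hL
  have hn0 : vals.length ≠ 0 := by simpa [List.length_eq_zero_iff] using hne
  have hLne : L ≠ [] := by
    rw [hL, Ne, List.map_eq_nil_iff, List.range_eq_nil]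
    exact hn0
  have hbr : PySem.List.sorted L (fun x : List Int => x) true = sortedLO L := sorted_rev_bridge L
  have hsne : sortedLO L ≠ [] := sortedLO_ne_nil L hLne
  obtain ⟨m, t, hmt⟩ := List.exists_cons_of_ne_nil hsne
  rw [hbr, hmt, PySem.List.pyGetD_zero_cons]
  have hge : ∀ y ∈ L, y ≤ m := sortedLO_head_ge L m t hmt
  have hmem : m ∈ L := by
    have hp := (sortedLO_perm L).mem_iff (a := m)
    rw [hmt] at hp
    exact hp.mp List.mem_cons_self
  have hrb : rotAt vals b ∈ L := by
    rw [hL]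
    exact List.mem_map_of_mem (List.mem_range.mpr hb)
  obtain ⟨j, hj, hjm⟩ := List.mem_map.mp hmem
  have h1 : m ≤ rotAt vals b := by
    rw [← hjm]
    exact hmax j (List.mem_range.mp hj)
  exact le_antisymm h1 (hge _ hrb)

-- A's rotation list (the inner foldl on the doubled list) is the map of rotAt over range
lemma lexi_eq_map (vals : List Int) :
    List.foldl (fun acc i => acc ++ [PySem.List.slice (vals ++ vals) (some i) (some (i + (vals.length : Int)))])
        ([] : List (List Int)) (PySem.List.pyRange 0 (vals.length : Int) 1)
      = (List.range vals.length).map (fun j => rotAt vals j) := by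
  rw [PySem.List.foldl_append_singleton_eq_map, List.nil_append, PySem.List.pyRange_one]
  rw [show ((vals.length : Int) - 0).toNat = vals.length by omega, List.map_map]
  apply List.map_congr_left
  intro k hk
  have hk' : k < vals.length := List.mem_range.mp hk
  show PySem.List.slice (vals ++ vals) (some (0 + (k : Int))) (some (0 + (k : Int) + (vals.length : Int))) = _
  rw [zero_add]
  exact slice_rot vals k (le_of_lt hk')

-- per-cycle bodies of the two ports (size fixed), to state the loop invariant
def Abody (size : Int) (st : List (List Int) × List (List Int)) (cyc : List (List Int)) :
    List (List Int) × List (List Int) :=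
  let f := PySem.List.pyGetD cyc 0 []
  if PySem.List.pyGetD f 0 0 = PySem.List.pyGetD f (-1) 0 then
    (st.1 ++ [PySem.List.slice f none (some (size - 1))], st.2)
  else
    let cycle_length : Int := PySem.List.len cyc
    let reval := cyc.map (fun x => PySem.List.pyGetD x (-1) 0)
    let reval2 := reval ++ reval
    let lexi := List.foldl
      (fun acc i => acc ++ [PySem.List.slice reval2 (some i) (some (i + cycle_length))])
      st.2 (PySem.List.pyRange 0 cycle_length 1)
    let sortedl := PySem.List.sorted lexi (fun x => x) true
    (st.1 ++ [PySem.List.slice (PySem.List.pyGetD sortedl 0 []) none (some (size - 1))], [])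

def Bbody (size : Int) (out : List (List Int)) (cyc : List (List Int)) : List (List Int) :=
  let f := PySem.List.pyGetD cyc 0 []
  if PySem.List.pyGetD f 0 0 = PySem.List.pyGetD f (-1) 0 then
    out ++ [PySem.List.slice f none (some (size - 1))]
  else
    let vals := cyc.map (fun x => PySem.List.pyGetD x (-1) 0)
    let n : Int := PySem.List.len vals
    let best := List.foldl
      (fun best i => pyCmpLoop vals n i best (PySem.List.pyRange 0 n 1))
      0 (PySem.List.pyRange 1 n 1)
    let rot := PySem.List.slice vals (some best) none ++ PySem.List.slice vals none (some best)
    out ++ [PySem.List.slice rot none (some (size - 1))]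

lemma ends_eq (h : List Int) (hh : h ≠ []) (he : h.head? = h.getLast?) :
    PySem.List.pyGetD h 0 0 = PySem.List.pyGetD h (-1) 0 := by
  have h1 : PySem.List.pyGetD h (-1) 0 = h.getLast hh := PySem.List.pyGetD_neg_one h 0 hh
  rw [PySem.List.pyGetD_zero, h1]
  rw [List.getLast?_eq_some_getLast hh] at he
  cases h with
  | nil => cases hh rfl
  | cons a l =>
    simp only [List.head?_cons, Option.some.injEq] at he
    simpa using he

lemma body_eq (size : Int) (acc : List (List Int)) (cyc : List (List Int))
    (hcyc : cyc ≠ [] ∧ cyc.headI ≠ [] ∧ (cyc.headI.head? = cyc.headI.getLast? ∨ ∀ x ∈ cyc, x ≠ [])) :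
    Abody size (acc, []) cyc = (Bbody size acc cyc, []) := by
  obtain ⟨hne, hh, hdis⟩ := hcyc
  have hf : PySem.List.pyGetD cyc 0 [] = cyc.headI := by
    cases cyc with
    | nil => cases hne rfl
    | cons c cs => rw [PySem.List.pyGetD_zero_cons]; rfl
  simp only [Abody, Bbody]
  by_cases hcond : PySem.List.pyGetD (PySem.List.pyGetD cyc 0 []) 0 0
      = PySem.List.pyGetD (PySem.List.pyGetD cyc 0 []) (-1) 0
  · simp [hcond]
  · simp only [if_neg hcond]
    have hx : ∀ x ∈ cyc, x ≠ [] := by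
      rcases hdis with hdis | hx
      · exact absurd (by rw [hf]; exact ends_eq cyc.headI hh hdis) hcond
      · exact hx
    set vals := cyc.map (fun x => PySem.List.pyGetD x (-1) 0) with hvals
    have hvlen : vals.length = cyc.length := by rw [hvals, List.length_map]
    have hvne : vals ≠ [] := by
      rw [hvals, Ne, List.map_eq_nil_iff]
      exact hne
    have hlen1 : PySem.List.len cyc = (vals.length : Int) := by
      simp [PySem.List.len, hvlen]
    have hlen2 : PySem.List.len vals = (vals.length : Int) := by
      simp [PySem.List.len]
    rw [hlen1, hlen2]
    have hnpos : 1 ≤ vals.length :=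
      Nat.one_le_iff_ne_zero.mpr (fun h0 => hvne (List.length_eq_zero_iff.mp h0))
    obtain ⟨b, hb, hfold, hmax⟩ := fold_best_aux vals vals.length hnpos (le_refl _)
    rw [hfold, lexi_eq_map vals, rotB_slices vals b,
      sorted_head_eq vals hvne b hb (fun t ht => hmax t ht)]

lemma main_fold (size : Int) :
    ∀ (cl : List (List (List Int))) (acc : List (List Int)),
      (∀ cyc ∈ cl, cyc ≠ [] ∧ cyc.headI ≠ [] ∧ (cyc.headI.head? = cyc.headI.getLast? ∨ ∀ x ∈ cyc, x ≠ [])) →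
      (List.foldl (Abody size) (acc, []) cl).1 = List.foldl (Bbody size) acc cl
  | [], acc, _ => rfl
  | cyc :: cl, acc, h => by
      rw [List.foldl_cons, List.foldl_cons, body_eq size acc cyc (h cyc List.mem_cons_self)]
      exact main_fold size cl (Bbody size acc cyc) (fun c hc => h c (List.mem_cons_of_mem _ hc))

-- ===== VERDICT (by name: the statement is the Claim_ definition above) =====
theorem get_representlist_spec : Claim_equal_get_representlist := by
  intro cl _ hpre
  obtain ⟨hne, hall⟩ := hpre
  rw [Spec_get_representlist]
  show (List.foldl
      (fun st j => Abody (PySem.List.len (PySem.List.pyGetD (PySem.List.pyGetD cl 0 []) 0 [])) st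
        (PySem.List.pyGetD cl j []))
      ([], []) (PySem.List.pyRange 0 (PySem.List.len cl) 1)).1
    = List.foldl (Bbody (PySem.List.len (PySem.List.pyGetD (PySem.List.pyGetD cl 0 []) 0 []))) [] cl
  rw [PySem.List.foldl_pyRange_zero_pyGetD cl []
    (Abody (PySem.List.len (PySem.List.pyGetD (PySem.List.pyGetD cl 0 []) 0 []))) ([], [])]
  exact main_fold _ cl [] hall
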